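-- pv_equiv track=rewrite | github.com/tingtingshi123/external-seed2021-cancer-and-zhihuishuili-master | utils/Fileoputil.py | join_paths
-- ===== SOURCE A (Python) =====
-- def join_paths(p_dir, sub_path):
--     p_dir_list = []
--     sub_path_list = []
--     for i in p_dir.split("/"):
--         if i != "":
--             p_dir_list.append(i)
--     for j in sub_path.split("/"):
--         if j != "":
--             sub_path_list.append(j)
--     if p_dir[0] == "/":
--         path = "/" + "/".join(p_dir_list + sub_path_list)
--     else:
--         path = "/".join(p_dir_list + sub_path_list)
--     return path
-- ===== SOURCE B (Python) =====
-- def join_paths(p_dir, sub_path):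
--     # Single-pass character state machine: scan p_dir + "/" + sub_path once,
--     # collapsing slash runs and dropping leading/trailing slashes; no split/join.
--     lead = "/" if p_dir[0] == "/" else ""
--     out = []
--     pending = False
--     for ch in p_dir + "/" + sub_path:
--         if ch == "/":
--             pending = bool(out)
--         else:
--             if pending:
--                 out.append("/")
--                 pending = False
--             out.append(ch)
--     return lead + "".join(out)
-- ===== Notes on version B (the rewrite author's own statement) =====
-- stated objective: alternative
-- what changed: B replaces A's split/filter/join pipeline with a single-pass character state machine over p_dir + '/' + sub_path that collapses slash runs and drops boundary slashes with a pending-separator flag.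
-- outside the precondition, e.g. on join_paths('', 'a/b'): A raises IndexError, B raises IndexError
import Mathlib
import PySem

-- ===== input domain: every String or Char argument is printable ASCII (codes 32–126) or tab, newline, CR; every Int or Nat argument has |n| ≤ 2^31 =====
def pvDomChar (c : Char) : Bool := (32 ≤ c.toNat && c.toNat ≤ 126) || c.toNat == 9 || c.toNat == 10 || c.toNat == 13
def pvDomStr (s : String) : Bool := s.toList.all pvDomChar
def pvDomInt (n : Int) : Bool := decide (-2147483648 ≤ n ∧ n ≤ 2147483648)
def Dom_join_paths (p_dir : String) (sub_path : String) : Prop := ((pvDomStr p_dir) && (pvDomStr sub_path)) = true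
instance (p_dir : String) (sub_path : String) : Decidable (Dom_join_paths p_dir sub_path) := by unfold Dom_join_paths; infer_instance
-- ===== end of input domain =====

-- B replaces A's split/filter/join pipeline with a single-pass character state machine
-- (pending-separator flag) over p_dir + "/" + sub_path; same cost, different algorithm.
-- Both raise IndexError on empty p_dir (p_dir[0]), hence Pre_ excludes p_dir = "".

-- ===== PORT A =====
def join_paths (p_dir : String) (sub_path : String) : String :=
  -- the two append loops are foldls over the split pieces
  let p_dir_list := (PySem.Chars.splitOn p_dir.toList ['/']).foldl
    (fun acc i => if i ≠ [] then acc ++ [i] else acc) []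
  let sub_path_list := (PySem.Chars.splitOn sub_path.toList ['/']).foldl
    (fun acc j => if j ≠ [] then acc ++ [j] else acc) []
  match PySem.List.pyGet? p_dir.toList 0 with
  | some c =>
      if c = '/' then
        String.ofList ('/' :: PySem.Chars.join ['/'] (p_dir_list ++ sub_path_list))
      else
        String.ofList (PySem.Chars.join ['/'] (p_dir_list ++ sub_path_list))
  | none => ""   -- IndexError in Python: excluded by Pre_

-- ===== PORT B =====
def join_paths_alt (p_dir : String) (sub_path : String) : String :=
  match PySem.List.pyGet? p_dir.toList 0 with
  | none => ""   -- IndexError in Python (p_dir[0]): excluded by Pre_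
  | some c0 =>
      let lead : List Char := if c0 = '/' then ['/'] else []
      -- the for-loop over the characters of p_dir + "/" + sub_path, state (out, pending)
      let st := (p_dir.toList ++ '/' :: sub_path.toList).foldl
        (fun (st : List Char × Bool) ch =>
          if ch = '/' then (st.1, !st.1.isEmpty)
          else if st.2 then (st.1 ++ ['/', ch], false) else (st.1 ++ [ch], false))
        ([], false)
      String.ofList (lead ++ st.1)

-- ===== PRECONDITION & SPEC =====
-- A evaluates p_dir[0], which raises IndexError when p_dir is empty.
def Pre_join_paths (p_dir : String) (sub_path : String) : Prop := p_dir ≠ ""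
instance (p_dir : String) (sub_path : String) : Decidable (Pre_join_paths p_dir sub_path) := by
  unfold Pre_join_paths; infer_instance
def pvWitness_join_paths : String × String := ("/usr/local", "bin//lean")
def Spec_join_paths (p_dir : String) (sub_path : String) (out : String) : Prop := out = join_paths_alt p_dir sub_path
instance (p_dir : String) (sub_path : String) (out : String) : Decidable (Spec_join_paths p_dir sub_path out) := by unfold Spec_join_paths; infer_instance

-- ===== CLAIM (what is proved, stated in full; the proofs are below) =====
def Claim_equal_join_paths : Prop := ∀ (p_dir : String) (sub_path : String), Dom_join_paths p_dir sub_path → Pre_join_paths p_dir sub_path → Spec_join_paths p_dir sub_path (join_paths p_dir sub_path)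

-- ===== LEMMAS AND PROOFS =====

/-- Simple structural single-separator split. -/
def splitc (s : Char) : List Char → List (List Char)
  | [] => [[]]
  | c :: rest =>
      if c = s then [] :: splitc s rest
      else match splitc s rest with
        | [] => [[c]]
        | h :: t => (c :: h) :: t

theorem splitc_ne_nil (s : Char) (l : List Char) : splitc s l ≠ [] := by
  cases l with
  | nil => simp [splitc]
  | cons c rest =>
      simp only [splitc]
      split_ifs
      · simp
      · cases h : splitc s rest <;> simp

/-- `consHead x ys` prepends `x` to the head of `ys`. -/
def consHead (x : List Char) : List (List Char) → List (List Char)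
  | [] => [x]
  | h :: t => (x ++ h) :: t

theorem consHead_nil_of_ne_nil (ys : List (List Char)) (h : ys ≠ []) :
    consHead [] ys = ys := by
  cases ys with
  | nil => exact absurd rfl h
  | cons a t => simp [consHead]

/-- The fuelled `splitOn.go` with a single-char separator computes `splitc`. -/
theorem go_eq_splitc (s : Char) (l : List Char) (fuel : Nat) (cur : List Char)
    (acc : List (List Char)) (hf : l.length ≤ fuel) :
    PySem.Chars.splitOn.go [s] fuel l cur acc
      = acc.reverse ++ consHead cur.reverse (splitc s l) := by
  induction l generalizing fuel cur acc with
  | nil =>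
      cases fuel <;> simp [PySem.Chars.splitOn.go, splitc, consHead]
  | cons c rest ih =>
      cases fuel with
      | zero => simp at hf
      | succ f =>
          simp only [List.length_cons, Nat.succ_le_succ_iff] at hf
          by_cases hc : c = s
          · subst hc
            have hpre : List.isPrefixOf [c] (c :: rest) = true := by
              simp [List.isPrefixOf]
            simp only [PySem.Chars.splitOn.go, hpre, if_true, List.length_singleton,
              List.drop_succ_cons, List.drop_zero]
            rw [ih f [] (cur.reverse :: acc) hf]
            simp only [splitc, if_true, List.reverse_cons, List.reverse_nil,
              List.append_assoc]
            rw [consHead_nil_of_ne_nil _ (splitc_ne_nil c rest)]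
            simp [consHead]
          · have hpre : List.isPrefixOf [s] (c :: rest) = false := by
              simp [List.isPrefixOf, BEq.beq]
              intro h; exact absurd h.symm hc
            simp only [PySem.Chars.splitOn.go, hpre, Bool.false_eq_true, if_false]
            rw [ih f (c :: cur) acc hf]
            simp only [splitc, hc, if_false, List.reverse_cons]
            congr 1
            cases hsp : splitc s rest with
            | nil => exact absurd hsp (splitc_ne_nil s rest)
            | cons h t => simp [consHead]

theorem splitOn_single (s : Char) (l : List Char) :
    PySem.Chars.splitOn l [s] = splitc s l := by
  unfold PySem.Chars.splitOn
  rw [go_eq_splitc s l (l.length + 1) [] [] (Nat.le_succ _)]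
  simp [consHead_nil_of_ne_nil _ (splitc_ne_nil s l)]

/-- Splitting a concatenation at the joining separator splits each part. -/
theorem splitc_append (s : Char) (a b : List Char) :
    splitc s (a ++ s :: b) = splitc s a ++ splitc s b := by
  induction a with
  | nil => simp [splitc]
  | cons c a' ih =>
      by_cases hc : c = s
      · subst hc; simp [splitc, ih]
      · simp only [List.cons_append, splitc, hc, if_false, ih]
        cases hsp : splitc s a' with
        | nil => exact absurd hsp (splitc_ne_nil s a')
        | cons h t => simp

/-- `W segs` = "/".join of the nonempty segments. -/
def W (segs : List (List Char)) : List Char :=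
  PySem.Chars.join ['/'] (segs.filter (fun x => x ≠ []))

theorem join_ne_nil (h : List Char) (t : List (List Char)) (hh : h ≠ []) :
    PySem.Chars.join ['/'] (h :: t) ≠ [] := by
  cases t with
  | nil => simpa [PySem.Chars.join_singleton] using hh
  | cons a b =>
      rw [PySem.Chars.join_cons_cons]
      cases h with
      | nil => exact absurd rfl hh
      | cons c cs => simp

theorem W_cons (h : List Char) (t : List (List Char)) :
    W (h :: t) = if h = [] then W t
      else h ++ (if W t = [] then [] else '/' :: W t) := by
  by_cases hh : h = []
  · simp [W, hh]
  · have hdh : decide (h ≠ []) = true := by simp [hh]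
    cases hft : t.filter (fun x => x ≠ []) with
    | nil =>
        unfold W
        rw [List.filter_cons, if_pos hdh, hft, if_neg hh,
          PySem.Chars.join_singleton, PySem.Chars.join_nil]
        simp
    | cons a b =>
        have ha : a ≠ [] := by
          have hmem : a ∈ t.filter (fun x => x ≠ []) := by
            rw [hft]; exact List.mem_cons_self
          simpa using List.of_mem_filter hmem
        have hne : PySem.Chars.join ['/'] (a :: b) ≠ [] := join_ne_nil a b ha
        unfold W
        rw [List.filter_cons, if_pos hdh, hft, if_neg hh,
          PySem.Chars.join_cons_cons, if_neg hne]
        simp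

/-- The state machine, indexed by (chars, out-nonempty, pending). -/
def mrun : List Char → Bool → Bool → List Char
  | [], _, _ => []
  | c :: t, ne, p =>
      if c = '/' then mrun t ne ne
      else if p then '/' :: c :: mrun t true false else c :: mrun t true false

theorem fold_mrun (l : List Char) (acc : List Char) (p : Bool) :
    ((l.foldl
        (fun (st : List Char × Bool) ch =>
          if ch = '/' then (st.1, !st.1.isEmpty)
          else if st.2 then (st.1 ++ ['/', ch], false) else (st.1 ++ [ch], false))
        (acc, p)).1) = acc ++ mrun l (!acc.isEmpty) p := by
  induction l generalizing acc p with
  | nil => simp [mrun]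
  | cons c t ih =>
      by_cases hc : c = '/'
      · subst hc
        simp only [List.foldl_cons, if_pos rfl, mrun]
        exact ih acc _
      · cases p with
        | false =>
            rw [List.foldl_cons]
            simp only [if_neg hc, Bool.false_eq_true, if_false]
            rw [ih (acc ++ [c]) false,
              show (acc ++ [c]).isEmpty = false by simp]
            simp [mrun, hc]
        | true =>
            rw [List.foldl_cons]
            simp only [if_neg hc, if_true]
            rw [ih (acc ++ ['/', c]) false,
              show (acc ++ ['/', c]).isEmpty = false by simp]
            simp [mrun, hc]

theorem mrun_spec (l : List Char) :
    mrun l false false = W (splitc '/' l) ∧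
    mrun l true true = (if W (splitc '/' l) = [] then [] else '/' :: W (splitc '/' l)) ∧
    mrun l true false =
      (splitc '/' l).headI ++
        (if W (splitc '/' l).tail = [] then [] else '/' :: W (splitc '/' l).tail) := by
  induction l with
  | nil => simp [mrun, splitc, W]
  | cons c t ih =>
      obtain ⟨ihA, ihB, ihC⟩ := ih
      by_cases hc : c = '/'
      · subst hc
        simp only [mrun, splitc, if_pos rfl]
        exact ⟨ihA, ihB, by simpa using ihB⟩
      · cases hsp : splitc '/' t with
        | nil => exact absurd hsp (splitc_ne_nil '/' t)
        | cons h tl =>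
            rw [hsp] at ihC
            simp only [List.headI, List.tail] at ihC
            have hstep : splitc '/' (c :: t) = (c :: h) :: tl := by
              simp [splitc, hc, hsp]
            have hWl : W (splitc '/' (c :: t)) = c :: (h ++ (if W tl = [] then [] else '/' :: W tl)) := by
              rw [hstep, W_cons]; simp
            have hA : mrun (c :: t) false false = W (splitc '/' (c :: t)) := by
              simp only [mrun, if_neg hc, if_neg (Bool.false_ne_true), hWl]
              simpa using ihC
            refine ⟨hA, ?_, ?_⟩
            · have hm : mrun (c :: t) true true = '/' :: c :: mrun t true false := by
                simp [mrun, hc]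
              rw [hm, hWl, if_neg (by simp), ihC]
            · simp only [mrun, if_neg hc, if_neg (Bool.false_ne_true), hstep,
                List.headI, List.tail, List.cons_append, ihC]

theorem join_paths_eq (p_dir sub_path : String) :
    join_paths p_dir sub_path = join_paths_alt p_dir sub_path := by
  unfold join_paths join_paths_alt
  cases hg : PySem.List.pyGet? p_dir.toList 0 with
  | none => simp
  | some c0 =>
      simp only []
      rw [fold_mrun]
      simp only [List.isEmpty_nil, Bool.not_true, List.nil_append]
      rw [(mrun_spec _).1, splitc_append, splitOn_single, splitOn_single,
        PySem.List.foldl_append_ite_eq_filter, PySem.List.foldl_append_ite_eq_filter]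
      simp only [W, List.filter_append]
      by_cases h0 : c0 = '/' <;> simp [h0]

-- ===== VERDICT (by name: the statement is the Claim_ definition above) =====
theorem join_paths_spec : Claim_equal_join_paths := by
  intro p_dir sub_path _ _
  exact join_paths_eq p_dir sub_path
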